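-- pv_equiv track=rewrite | github.com/T-monius/python-small-problems | medium-1/thousand_lights/thousand_lights.py | n_toggled_switches_n_times_from_n
-- ===== SOURCE A (Python) =====
-- def n_toggled_switches_n_times_from_n(num):
--     '''Create a List of booleans representing a 'switch bank' and
--        iterate it num times toggling switches divisible by the given
--        iteration'''
--     switch_bank = [False for num in range(0, num)]
--
--     for walk in range(1, num + 1):
--         for idx, switch in list(enumerate(switch_bank)):
--             is_flip = (idx + 1) % walk == 0
--             if is_flip:
--                 switch_bank[idx] = not switch
--
--     return switch_bank
-- ===== SOURCE B (Python) =====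
-- def n_toggled_switches_n_times_from_n(num):
--     '''A switch ends up on iff its 1-based position is a perfect square
--        (it is toggled once per divisor, and only squares have an odd
--        number of divisors).  One pass, tracking the next square.'''
--     result = []
--     k = 1
--     for i in range(1, num + 1):
--         on = k * k == i
--         result.append(on)
--         if on:
--             k += 1
--     return result
-- ===== Notes on version B (the rewrite author's own statement) =====
-- stated objective: faster
-- what changed: Replaces the O(n^2) double loop (toggle every switch for every walk) by a single O(n) pass that marks exactly the perfect-square positions, tracking the next square incrementally; equivalence rests on the classic fact that a number has an odd divisor count iff it is a square.
import Mathlib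
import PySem

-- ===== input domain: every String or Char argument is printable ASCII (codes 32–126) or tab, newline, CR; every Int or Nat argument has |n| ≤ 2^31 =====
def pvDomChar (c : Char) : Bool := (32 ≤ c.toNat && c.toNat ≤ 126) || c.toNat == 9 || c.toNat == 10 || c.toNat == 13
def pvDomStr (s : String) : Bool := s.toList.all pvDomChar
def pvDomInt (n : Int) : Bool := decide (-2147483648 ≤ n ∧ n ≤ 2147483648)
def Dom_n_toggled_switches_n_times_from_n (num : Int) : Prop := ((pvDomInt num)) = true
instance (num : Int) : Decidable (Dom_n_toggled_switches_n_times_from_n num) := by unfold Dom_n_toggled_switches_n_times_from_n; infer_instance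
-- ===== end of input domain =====

-- B replaces A's quadratic toggle-every-walk double loop by one linear pass that marks
-- exactly the perfect-square positions (a position is left on iff its 1-based index
-- has an odd number of divisors, i.e. is a perfect square).

-- ===== PORT A =====
def n_toggled_switches_n_times_from_n (num : Int) : List Bool :=
  let switch_bank := (PySem.List.pyRange 0 num).map (fun _ => false)
  (PySem.List.pyRange 1 (num + 1)).foldl
    (fun bank walk =>
      (PySem.List.enumerate bank).foldl
        (fun bank2 p =>
          let is_flip := PySem.Int.mod (p.1 + 1) walk == 0
          if is_flip then PySem.List.pySetD bank2 p.1 (!p.2) else bank2)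
        bank)
    switch_bank

-- ===== PORT B =====
def n_toggled_switches_n_times_from_n_alt (num : Int) : List Bool :=
  ((PySem.List.pyRange 1 (num + 1)).foldl
    (fun st i =>
      let on := st.2 * st.2 == i
      (st.1 ++ [on], if on then st.2 + 1 else st.2))
    ([], 1)).1

-- ===== PRECONDITION & SPEC =====
def Spec_n_toggled_switches_n_times_from_n (num : Int) (out : List Bool) : Prop := out = n_toggled_switches_n_times_from_n_alt num
instance (num : Int) (out : List Bool) : Decidable (Spec_n_toggled_switches_n_times_from_n num out) := by unfold Spec_n_toggled_switches_n_times_from_n; infer_instance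

-- ===== CLAIM (what is proved, stated in full; the proofs are below) =====
def Claim_equal_n_toggled_switches_n_times_from_n : Prop := ∀ (num : Int), Dom_n_toggled_switches_n_times_from_n num → Spec_n_toggled_switches_n_times_from_n num (n_toggled_switches_n_times_from_n num)

-- ===== LEMMAS AND PROOFS =====

-- ---- number theory: a positive integer has an odd number of divisors iff it is a square ----

theorem pv_odd_finset_prod_iff (s : Finset ℕ) (f : ℕ → ℕ) :
    Odd (∏ p ∈ s, f p) ↔ ∀ p ∈ s, Odd (f p) := by
  classical
  induction s using Finset.induction_on with
  | empty => simp
  | insert a s ha ih =>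
    rw [Finset.prod_insert ha, Nat.odd_mul, ih]
    constructor
    · rintro ⟨h1, h2⟩ p hp
      rcases Finset.mem_insert.mp hp with rfl | hp
      · exact h1
      · exact h2 p hp
    · intro h
      exact ⟨h a (Finset.mem_insert_self a s),
             fun p hp => h p (Finset.mem_insert_of_mem hp)⟩

theorem pv_isSquare_iff_even_factorization (m : ℕ) (hm : m ≠ 0) :
    IsSquare m ↔ ∀ p, Even (m.factorization p) := by
  constructor
  · rintro ⟨r, rfl⟩ p
    have hr : r ≠ 0 := by rintro rfl; simp at hm
    rw [Nat.factorization_mul hr hr]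
    exact ⟨r.factorization p, by simp⟩
  · intro h
    refine ⟨m.factorization.prod fun p k => p ^ (k / 2), ?_⟩
    conv_lhs => rw [← Nat.prod_factorization_pow_eq_self hm]
    rw [Finsupp.prod, Finsupp.prod, ← Finset.prod_mul_distrib]
    apply Finset.prod_congr rfl
    intro p _
    rw [← pow_add]
    congr 1
    obtain ⟨c, hc⟩ := h p
    omega

theorem pv_odd_card_divisors_iff (m : ℕ) (hm : m ≠ 0) :
    Odd m.divisors.card ↔ IsSquare m := by
  rw [Nat.card_divisors hm, pv_odd_finset_prod_iff, pv_isSquare_iff_even_factorization m hm]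
  constructor
  · intro h p
    by_cases hp : p ∈ m.primeFactors
    · have := h p hp
      rw [Nat.odd_add_one] at this
      exact Nat.not_odd_iff_even.mp this
    · rw [← Nat.support_factorization] at hp
      simp [Finsupp.notMem_support_iff.mp hp]
  · intro h p _
    rw [Nat.odd_add_one, Nat.not_odd_iff_even]
    exact h p

-- ---- toggle-count model for A ----

def pvCnt (m w : ℕ) : ℕ := ((Finset.range w).filter (fun d => (d + 1) ∣ m)).card

def pvBankA (n w : ℕ) : List Bool := (List.range n).map (fun j => decide (Odd (pvCnt (j + 1) w)))

def pvSqList (n : ℕ) : List Bool := (List.range n).map (fun j => decide (IsSquare (j + 1)))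

theorem pvCnt_zero (m : ℕ) : pvCnt m 0 = 0 := by simp [pvCnt]

theorem pvCnt_step (m w : ℕ) :
    pvCnt m (w + 1) = pvCnt m w + (if (w + 1) ∣ m then 1 else 0) := by
  classical
  unfold pvCnt
  rw [Finset.range_add_one, Finset.filter_insert]
  split_ifs with h
  · rw [Finset.card_insert_of_notMem (by simp)]
  · simp

theorem pvCnt_full (m n : ℕ) (h1 : 1 ≤ m) (h2 : m ≤ n) : pvCnt m n = m.divisors.card := by
  classical
  have himg : Finset.image (fun d => d + 1) ((Finset.range n).filter (fun d => (d + 1) ∣ m))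
      = m.divisors := by
    ext x
    simp only [Finset.mem_image, Finset.mem_filter, Finset.mem_range, Nat.mem_divisors]
    constructor
    · rintro ⟨d, ⟨_, hdvd⟩, rfl⟩
      exact ⟨hdvd, by omega⟩
    · rintro ⟨hdvd, _⟩
      have hx1 : 1 ≤ x := Nat.pos_of_dvd_of_pos hdvd (by omega)
      have hxm : x ≤ m := Nat.le_of_dvd (by omega) hdvd
      exact ⟨x - 1, ⟨by omega, by rwa [Nat.sub_add_cancel hx1]⟩, by omega⟩
  rw [← himg, Finset.card_image_of_injective _ (fun a b => by omega)]
  rfl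

theorem pv_decide_odd_succ (c : ℕ) : decide (Odd (c + 1)) = !decide (Odd c) := by
  by_cases h : Odd c
  · simp [h, Nat.odd_add_one]
  · simp [h, Nat.odd_add_one]

-- ---- sqrt stepping facts for B ----

theorem pv_sq_succ_iff (n : ℕ) :
    (Nat.sqrt n + 1) * (Nat.sqrt n + 1) = n + 1 ↔ IsSquare (n + 1) := by
  constructor
  · intro h
    exact ⟨Nat.sqrt n + 1, h.symm⟩
  · rintro ⟨r, hr⟩
    have hr1 : 1 ≤ r := by
      rcases Nat.eq_zero_or_pos r with rfl | h
      · omega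
      · exact h
    have hs : Nat.sqrt n = r - 1 := by
      apply le_antisymm
      · have : Nat.sqrt n < r := Nat.sqrt_lt.mpr (by rw [← hr]; omega)
        omega
      · apply Nat.le_sqrt.mpr
        have hlt : (r - 1) * (r - 1) < r * r := Nat.mul_self_lt_mul_self (by omega)
        rw [← hr] at hlt
        omega
    rw [hs]
    have h1 : r - 1 + 1 = r := by omega
    rw [h1, ← hr]

theorem pv_sqrt_succ (n : ℕ) :
    Nat.sqrt (n + 1) =
      if (Nat.sqrt n + 1) * (Nat.sqrt n + 1) = n + 1 then Nat.sqrt n + 1 else Nat.sqrt n := by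
  split_ifs with h
  · apply le_antisymm
    · have h2 : (Nat.sqrt n + 1) * (Nat.sqrt n + 1) < (Nat.sqrt n + 2) * (Nat.sqrt n + 2) :=
        Nat.mul_self_lt_mul_self (by omega)
      rw [h] at h2
      have := Nat.sqrt_lt.mpr h2
      omega
    · exact Nat.le_sqrt.mpr (le_of_eq h)
  · apply le_antisymm
    · have h1 := Nat.lt_succ_sqrt n
      have hle : n + 1 ≤ (Nat.sqrt n + 1) * (Nat.sqrt n + 1) := by
        simpa [Nat.succ_eq_add_one] using h1
      have hlt : n + 1 < (Nat.sqrt n + 1) * (Nat.sqrt n + 1) :=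
        lt_of_le_of_ne hle (fun e => h e.symm)
      have := Nat.sqrt_lt.mpr hlt
      omega
    · exact Nat.sqrt_le_sqrt (by omega)

theorem pvSqList_succ (n : ℕ) :
    pvSqList (n + 1) = pvSqList n ++ [decide (IsSquare (n + 1))] := by
  simp [pvSqList, List.range_succ]

-- ---- B's loop computes pvSqList ----

theorem pvB_loop (n : ℕ) :
    (PySem.List.pyRange 1 ((n : Int) + 1)).foldl
      (fun st i =>
        let on := st.2 * st.2 == i
        (st.1 ++ [on], if on then st.2 + 1 else st.2))
      (([] : List Bool), (1 : Int))
    = (pvSqList n, ((Nat.sqrt n : Int) + 1)) := by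
  induction n with
  | zero => simp [PySem.List.pyRange_one_eq_nil, pvSqList]
  | succ n ih =>
    have hcast : (((n + 1 : ℕ) : Int) + 1) = ((n : Int) + 1) + 1 := by push_cast; ring
    rw [hcast, PySem.List.pyRange_one_succ_right (by omega), List.foldl_append, ih]
    simp only [List.foldl_cons, List.foldl_nil]
    by_cases h : (Nat.sqrt n + 1) * (Nat.sqrt n + 1) = n + 1
    · have hInt : ((Nat.sqrt n : Int) + 1) * ((Nat.sqrt n : Int) + 1) = (n : Int) + 1 := by
        exact_mod_cast h
      have hsq : IsSquare (n + 1) := (pv_sq_succ_iff n).mp h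
      simp [hInt, pvSqList_succ, hsq, pv_sqrt_succ, h]
    · have hInt : ((Nat.sqrt n : Int) + 1) * ((Nat.sqrt n : Int) + 1) ≠ (n : Int) + 1 := by
        intro hc
        exact h (by exact_mod_cast hc)
      have hsq : ¬ IsSquare (n + 1) := fun hc => h ((pv_sq_succ_iff n).mpr hc)
      simp [hInt, pvSqList_succ, hsq, pv_sqrt_succ, h]

-- ---- A's inner loop: writing through a snapshot of enumerate is a map ----

theorem pv_set_append_length (l r : List Bool) (b x : Bool) :
    (l ++ b :: r).set l.length x = l ++ x :: r := by
  induction l with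
  | nil => rfl
  | cons a l ih => simp [ih]

theorem pv_inner (w : Int) (rest : List Bool) :
    ∀ done : List Bool,
      (PySem.List.enumerate rest ((done.length : Int))).foldl
        (fun bank2 p =>
          let is_flip := PySem.Int.mod (p.1 + 1) w == 0
          if is_flip then PySem.List.pySetD bank2 p.1 (!p.2) else bank2)
        (done ++ rest)
      = done ++ (PySem.List.enumerate rest ((done.length : Int))).map
          (fun p => if PySem.Int.mod (p.1 + 1) w == 0 then !p.2 else p.2) := by
  induction rest with
  | nil => intro done; simp [PySem.List.enumerate]
  | cons b rest ih =>
    intro done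
    rw [PySem.List.enumerate_cons, List.foldl_cons, List.map_cons]
    show
      (PySem.List.enumerate rest ((done.length : Int) + 1)).foldl
        (fun bank2 p =>
          let is_flip := PySem.Int.mod (p.1 + 1) w == 0
          if is_flip then PySem.List.pySetD bank2 p.1 (!p.2) else bank2)
        (if (PySem.Int.mod ((done.length : Int) + 1) w == 0)
          then PySem.List.pySetD (done ++ b :: rest) ((done.length : Int)) (!b)
          else done ++ b :: rest)
      = done ++ (if (PySem.Int.mod ((done.length : Int) + 1) w == 0) then !b else b)
          :: (PySem.List.enumerate rest ((done.length : Int) + 1)).map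
              (fun p => if PySem.Int.mod (p.1 + 1) w == 0 then !p.2 else p.2)
    have key : ∀ v : Bool,
        (PySem.List.enumerate rest ((done.length : Int) + 1)).foldl
          (fun bank2 p =>
            let is_flip := PySem.Int.mod (p.1 + 1) w == 0
            if is_flip then PySem.List.pySetD bank2 p.1 (!p.2) else bank2)
          (done ++ v :: rest)
        = done ++ v :: (PySem.List.enumerate rest ((done.length : Int) + 1)).map
            (fun p => if PySem.Int.mod (p.1 + 1) w == 0 then !p.2 else p.2) := by
      intro v
      have h2 := ih (done ++ [v])
      have hl : (((done ++ [v]).length : Int)) = (done.length : Int) + 1 := by simp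
      rw [hl] at h2
      simpa using h2
    by_cases hf : (PySem.Int.mod ((done.length : Int) + 1) w == 0) = true
    · rw [if_pos hf, PySem.List.pySetD_natCast, pv_set_append_length, if_pos hf]
      exact key (!b)
    · rw [if_neg hf, if_neg hf]
      exact key b

-- ---- enumerate of a range-map ----

theorem pv_enumerate_map_range (g : ℕ → Bool) (n : ℕ) :
    PySem.List.enumerate ((List.range n).map g) 0
      = (List.range n).map (fun (j : ℕ) => (((j : ℕ) : Int), g j)) := by
  apply List.ext_getElem
  · simp [PySem.List.length_enumerate]
  · intro i h1 h2
    simp [PySem.List.getElem_enumerate]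

-- ---- A's outer loop computes pvBankA ----

theorem pvA_step (n w : ℕ) :
    (PySem.List.enumerate (pvBankA n w)).foldl
      (fun bank2 p =>
        let is_flip := PySem.Int.mod (p.1 + 1) ((w : Int) + 1) == 0
        if is_flip then PySem.List.pySetD bank2 p.1 (!p.2) else bank2)
      (pvBankA n w)
    = pvBankA n (w + 1) := by
  have h := pv_inner ((w : Int) + 1) (pvBankA n w) []
  simp only [List.nil_append, List.length_nil, Nat.cast_zero] at h
  rw [h]
  show (PySem.List.enumerate (pvBankA n w) 0).map _ = _
  unfold pvBankA
  rw [pv_enumerate_map_range, List.map_map]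
  apply List.map_congr_left
  intro j _
  simp only [Function.comp]
  have hmod : PySem.Int.mod ((j : Int) + 1) ((w : Int) + 1) = (((j + 1) % (w + 1) : ℕ) : Int) := by
    have := PySem.Int.mod_natCast (j + 1) (w + 1)
    push_cast at this ⊢
    exact this
  rw [hmod, pvCnt_step]
  by_cases hdvd : (w + 1) ∣ (j + 1)
  · have hz : (j + 1) % (w + 1) = 0 := Nat.dvd_iff_mod_eq_zero.mp hdvd
    simp [hz, hdvd, pv_decide_odd_succ]
  · have hz : (j + 1) % (w + 1) ≠ 0 := fun hc => hdvd (Nat.dvd_iff_mod_eq_zero.mpr hc)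
    have hzi : ((((j + 1) % (w + 1) : ℕ) : Int) == 0) = false := by
      rw [beq_eq_false_iff_ne]
      exact fun hc => hz (by exact_mod_cast hc)
    rw [hzi]
    simp [hdvd]

theorem pvA_loop (n : ℕ) (w : ℕ) :
    (PySem.List.pyRange 1 ((w : Int) + 1)).foldl
      (fun bank walk =>
        (PySem.List.enumerate bank).foldl
          (fun bank2 p =>
            let is_flip := PySem.Int.mod (p.1 + 1) walk == 0
            if is_flip then PySem.List.pySetD bank2 p.1 (!p.2) else bank2)
          bank)
      (pvBankA n 0)
    = pvBankA n w := by
  induction w with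
  | zero => simp [PySem.List.pyRange_one_eq_nil]
  | succ w ih =>
    have hcast : (((w + 1 : ℕ) : Int) + 1) = ((w : Int) + 1) + 1 := by push_cast; ring
    rw [hcast, PySem.List.pyRange_one_succ_right (by omega), List.foldl_append, ih]
    simp only [List.foldl_cons, List.foldl_nil]
    exact pvA_step n w

theorem pvBankA_final (n : ℕ) : pvBankA n n = pvSqList n := by
  unfold pvBankA pvSqList
  apply List.map_congr_left
  intro j hj
  rw [List.mem_range] at hj
  rw [pvCnt_full (j + 1) n (by omega) (by omega)]
  by_cases h : IsSquare (j + 1)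
  · simp [h, (pv_odd_card_divisors_iff (j + 1) (by omega)).mpr h]
  · have hodd : ¬ Odd (j + 1).divisors.card :=
      fun hc => h ((pv_odd_card_divisors_iff (j + 1) (by omega)).mp hc)
    simp [h, Nat.not_odd_iff_even.mp hodd]

-- ===== VERDICT (by name: the statement is the Claim_ definition above) =====
theorem n_toggled_switches_n_times_from_n_spec : Claim_equal_n_toggled_switches_n_times_from_n := by
  intro num _
  unfold Spec_n_toggled_switches_n_times_from_n
  simp only [n_toggled_switches_n_times_from_n, n_toggled_switches_n_times_from_n_alt]
  by_cases h : 0 ≤ num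
  · have hnum : num = ((num.toNat : ℕ) : Int) := (Int.toNat_of_nonneg h).symm
    rw [hnum]
    have hinit : (PySem.List.pyRange 0 ((num.toNat : ℕ) : Int)).map (fun _ => false)
        = pvBankA num.toNat 0 := by
      apply List.ext_getElem
      · simp [PySem.List.length_pyRange_one, pvBankA]
        omega
      · intro i h1 h2
        simp [pvBankA, pvCnt_zero]
    rw [hinit, pvA_loop num.toNat num.toNat, pvB_loop num.toNat, pvBankA_final num.toNat]
  · have h1 : PySem.List.pyRange 1 (num + 1) = [] := PySem.List.pyRange_one_eq_nil (by omega)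
    have h2 : PySem.List.pyRange 0 num = [] := PySem.List.pyRange_one_eq_nil (by omega)
    simp [h1, h2]
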